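-- pv_equiv track=rewrite | github.com/posl/comment_recommendation | script/mod_gen/2_time/ja/248_C/3.py | solve
-- ===== SOURCE A (Python) =====
-- def solve(n, m, k):
--     mod = 998244353
--     dp = [[0] * (k + 1) for _ in range(n + 1)]
--     dp[0][0] = 1
--     for i in range(n):
--         for j in range(k + 1):
--             dp[i + 1][j] = (dp[i + 1][j] + dp[i][j]) % mod
--             if j + m < k + 1:
--                 dp[i + 1][j + m] = (dp[i + 1][j + m] + dp[i][j]) % mod
--             else:
--                 dp[i + 1][k] = (dp[i + 1][k] + dp[i][j]) % mod
--     return dp[n][k]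
-- ===== SOURCE B (Python) =====
-- def solve(n, m, k):
--     mod = 998244353
--     # each of the n steps either adds m or nothing; A's capped dp counts the
--     # choice sequences whose total t*m reaches k, i.e. sum of C(n,t) for t >= ceil(k/m)
--     if m <= 0:
--         # a non-positive step can never raise the total: reachable iff k <= 0 already,
--         # and then every one of the 2^n sequences qualifies
--         return pow(2, n, mod) if k <= 0 else 0
--     t_min = -(-k // m)  # ceil(k / m)
--     if t_min < 0:
--         t_min = 0
--     total = 0
--     c = 1  # C(n, 0)
--     for t in range(n + 1):
--         if t >= t_min:
--             total += c
--         c = c * (n - t) // (t + 1)  # C(n, t+1), exact integer arithmetic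
--     return total % mod
-- ===== Notes on version B (the rewrite author's own statement) =====
-- stated objective: faster
-- what changed: Replaces the O(n*k) capped two-dimensional DP table by the closed form sum of binomial coefficients C(n,t) over t >= ceil(k/m) (with m <= 0 handled by a 2^n-or-0 case), computed in one O(n) pass that maintains C(n,t) by the exact multiplicative recurrence.
-- intended difference: On negative m with k >= 1 and n >= 1, a negative per-step contribution can never reach the threshold, so B returns the natural 0, while A's dp index j+m wraps around Python-style and it returns an accidental count (1 on (1,-1,1)). — e.g. on solve(1, -1, 1): A returns 1, B returns 0
-- outside the precondition, e.g. on solve(2, -2, 2): A returns 1, B returns 0; on solve(1, -2, 1): A returns 0, B returns 0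
import Mathlib
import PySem

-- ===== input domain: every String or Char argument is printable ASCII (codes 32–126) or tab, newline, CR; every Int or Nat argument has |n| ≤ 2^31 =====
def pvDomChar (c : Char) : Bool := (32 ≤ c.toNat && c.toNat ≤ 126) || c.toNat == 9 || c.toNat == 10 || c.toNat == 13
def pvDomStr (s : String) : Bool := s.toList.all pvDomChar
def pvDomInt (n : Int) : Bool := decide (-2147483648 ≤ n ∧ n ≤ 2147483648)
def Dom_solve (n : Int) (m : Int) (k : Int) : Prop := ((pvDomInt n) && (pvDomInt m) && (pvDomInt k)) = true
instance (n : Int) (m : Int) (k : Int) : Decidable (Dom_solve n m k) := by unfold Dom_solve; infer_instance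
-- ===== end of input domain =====

-- B replaces A's O(n*k) capped DP table by one O(n) pass summing binomial coefficients
-- C(n,t) over t ≥ ceil(k/m) (m ≤ 0 special-cased); measured much faster on large inputs.


-- ===== PORT A =====
def solve (n : Int) (m : Int) (k : Int) : Int :=
  let md : Int := 998244353
  let dp : List (List Int) :=
    (PySem.List.pyRange 0 (n + 1) 1).map (fun _ => PySem.List.pyRepeat [(0 : Int)] (k + 1))
  let dp := PySem.List.pySetD dp 0 (PySem.List.pySetD (PySem.List.pyGetD dp 0 []) 0 1)
  let dp := (PySem.List.pyRange 0 n 1).foldl (fun dp i =>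
    (PySem.List.pyRange 0 (k + 1) 1).foldl (fun dp j =>
      let dp := PySem.List.pySetD dp (i + 1)
        (PySem.List.pySetD (PySem.List.pyGetD dp (i + 1) []) j
          (PySem.Int.mod (PySem.List.pyGetD (PySem.List.pyGetD dp (i + 1) []) j 0 +
            PySem.List.pyGetD (PySem.List.pyGetD dp i []) j 0) md))
      if j + m < k + 1 then
        PySem.List.pySetD dp (i + 1)
          (PySem.List.pySetD (PySem.List.pyGetD dp (i + 1) []) (j + m)
            (PySem.Int.mod (PySem.List.pyGetD (PySem.List.pyGetD dp (i + 1) []) (j + m) 0 +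
              PySem.List.pyGetD (PySem.List.pyGetD dp i []) j 0) md))
      else
        PySem.List.pySetD dp (i + 1)
          (PySem.List.pySetD (PySem.List.pyGetD dp (i + 1) []) k
            (PySem.Int.mod (PySem.List.pyGetD (PySem.List.pyGetD dp (i + 1) []) k 0 +
              PySem.List.pyGetD (PySem.List.pyGetD dp i []) j 0) md))) dp) dp
  PySem.List.pyGetD (PySem.List.pyGetD dp n []) k 0

-- ===== PORT B =====
def solve_alt (n : Int) (m : Int) (k : Int) : Int :=
  let md : Int := 998244353
  if m ≤ 0 then
    (if k ≤ 0 then PySem.Int.powMod 2 n.toNat md else 0)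
  else
    let t0 := -(PySem.Int.floordiv (-k) m)
    let tmin := if t0 < 0 then 0 else t0
    let tc := (PySem.List.pyRange 0 (n + 1) 1).foldl (fun tc t =>
      ((if tmin ≤ t then tc.1 + tc.2 else tc.1),
        PySem.Int.floordiv (tc.2 * (n - t)) (t + 1))) ((0 : Int), (1 : Int))
    PySem.Int.mod tc.1 md

-- ===== PRECONDITION & SPEC =====
-- Pre_solve: n and k nonnegative (else A raises on the 'dp[0][0] = 1' or the row
-- construction), and m ≥ -1 unless the loop body never runs (n = 0).  It excludes
-- -(k+1) ≤ m ≤ -2 with n ≥ 1, where A still returns: there the written dp index j+m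
-- wraps around Python-style to an arbitrary column and the returned count is an
-- accident of the row length (sometimes 0, sometimes not) that no re-implementation
-- of the function's contract would reproduce; for m < -(k+1) with n ≥ 1 A raises
-- IndexError.
def Pre_solve (n : Int) (m : Int) (k : Int) : Prop :=
  0 ≤ n ∧ 0 ≤ k ∧ (-1 ≤ m ∨ n = 0)
instance (n : Int) (m : Int) (k : Int) : Decidable (Pre_solve n m k) := by
  unfold Pre_solve; infer_instance
def pvWitness_solve : Int × Int × Int := (3, 2, 4)

-- On negative m with k ≥ 1 and n ≥ 1, a negative per-step contribution can never reach
-- the threshold, so B returns the natural 0, while A's dp index j+m wraps around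
-- Python-style and it returns an accidental count (1 on (1,-1,1)).
def D_solve (n : Int) (m : Int) (k : Int) : Prop := m < 0 ∧ 1 ≤ k ∧ 1 ≤ n
instance (n : Int) (m : Int) (k : Int) : Decidable (D_solve n m k) := by
  unfold D_solve; infer_instance
def Spec_solve (n : Int) (m : Int) (k : Int) (out : Int) : Prop :=
  ¬ D_solve n m k → out = solve_alt n m k
instance (n : Int) (m : Int) (k : Int) (out : Int) : Decidable (Spec_solve n m k out) := by
  unfold Spec_solve; infer_instance
def pvDiffWitness_solve : Int × Int × Int := (1, -1, 1)
def pvDiffWitnessOut_solve : Int × Int := (1, 0)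

-- ===== CLAIM (what is proved, stated in full; the proofs are below) =====
def Claim_unchanged_solve : Prop := ∀ (n : Int) (m : Int) (k : Int),
  Dom_solve n m k → Pre_solve n m k → Spec_solve n m k (solve n m k)
def Claim_changed_solve : Prop :=
  Dom_solve (pvDiffWitness_solve.1) (pvDiffWitness_solve.2.1) (pvDiffWitness_solve.2.2) ∧
  Pre_solve (pvDiffWitness_solve.1) (pvDiffWitness_solve.2.1) (pvDiffWitness_solve.2.2) ∧
  D_solve (pvDiffWitness_solve.1) (pvDiffWitness_solve.2.1) (pvDiffWitness_solve.2.2) ∧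
  solve (pvDiffWitness_solve.1) (pvDiffWitness_solve.2.1) (pvDiffWitness_solve.2.2) = pvDiffWitnessOut_solve.1 ∧
  solve_alt (pvDiffWitness_solve.1) (pvDiffWitness_solve.2.1) (pvDiffWitness_solve.2.2) = pvDiffWitnessOut_solve.2 ∧
  pvDiffWitnessOut_solve.1 ≠ pvDiffWitnessOut_solve.2

-- ===== LEMMAS AND PROOFS =====

-- modulus of both programs, and proof-side helpers
def pvP : Int := 998244353

-- the dp-level body of A's inner loop (exactly the inner lambda of `solve`)
def pvDpBody (m k : Int) (i : Int) (dp : List (List Int)) (j : Int) : List (List Int) :=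
  let dp := PySem.List.pySetD dp (i + 1)
    (PySem.List.pySetD (PySem.List.pyGetD dp (i + 1) []) j
      (PySem.Int.mod (PySem.List.pyGetD (PySem.List.pyGetD dp (i + 1) []) j 0 +
        PySem.List.pyGetD (PySem.List.pyGetD dp i []) j 0) pvP))
  if j + m < k + 1 then
    PySem.List.pySetD dp (i + 1)
      (PySem.List.pySetD (PySem.List.pyGetD dp (i + 1) []) (j + m)
        (PySem.Int.mod (PySem.List.pyGetD (PySem.List.pyGetD dp (i + 1) []) (j + m) 0 +
          PySem.List.pyGetD (PySem.List.pyGetD dp i []) j 0) pvP))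
  else
    PySem.List.pySetD dp (i + 1)
      (PySem.List.pySetD (PySem.List.pyGetD dp (i + 1) []) k
        (PySem.Int.mod (PySem.List.pyGetD (PySem.List.pyGetD dp (i + 1) []) k 0 +
          PySem.List.pyGetD (PySem.List.pyGetD dp i []) j 0) pvP))

-- the same computation on a single row: prev = dp[i] (read only), cur = dp[i+1]
def pvRowBody (m k : Int) (prev : List Int) (cur : List Int) (j : Int) : List Int :=
  let cur := PySem.List.pySetD cur j
    (PySem.Int.mod (PySem.List.pyGetD cur j 0 + PySem.List.pyGetD prev j 0) pvP)
  if j + m < k + 1 then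
    PySem.List.pySetD cur (j + m)
      (PySem.Int.mod (PySem.List.pyGetD cur (j + m) 0 + PySem.List.pyGetD prev j 0) pvP)
  else
    PySem.List.pySetD cur k
      (PySem.Int.mod (PySem.List.pyGetD cur k 0 + PySem.List.pyGetD prev j 0) pvP)

def pvRowStep (m : Int) (K : Nat) (prev : List Int) : List Int :=
  (PySem.List.pyRange 0 ((K : Int) + 1) 1).foldl (pvRowBody m (K : Int) prev)
    (List.replicate (K + 1) 0)

def pvRows (m : Int) (K : Nat) : Nat → List Int
  | 0 => (List.replicate (K + 1) (0 : Int)).set 0 1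
  | r + 1 => pvRowStep m K (pvRows m K r)

lemma pvDpBody_eq (m k : Int) (i : Nat) (dp : List (List Int)) (j : Int)
    (h : i + 1 < dp.length) :
    pvDpBody m k (i : Int) dp j
      = PySem.List.pySetD dp ((i : Int) + 1)
          (pvRowBody m k (PySem.List.pyGetD dp (i : Int) [])
            (PySem.List.pyGetD dp ((i : Int) + 1) []) j) := by
  have hc : ((i : Int) + 1) = ((i + 1 : Nat) : Int) := by push_cast; ring
  have hget1 : ∀ v : List Int,
      PySem.List.pyGetD (PySem.List.pySetD dp ((i + 1 : Nat) : Int) v) ((i + 1 : Nat) : Int) []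
        = v := fun v => by
    rw [PySem.List.pyGetD_pySetD_natCast dp (i + 1) (i + 1) v [] h, if_pos rfl]
  have hget2 : ∀ v : List Int,
      PySem.List.pyGetD (PySem.List.pySetD dp ((i + 1 : Nat) : Int) v) ((i : Nat) : Int) []
        = PySem.List.pyGetD dp ((i : Nat) : Int) [] := fun v => by
    rw [PySem.List.pyGetD_pySetD_natCast dp (i + 1) i v [] h, if_neg (by omega)]
  have hset : ∀ v w : List Int,
      PySem.List.pySetD (PySem.List.pySetD dp ((i + 1 : Nat) : Int) v) ((i + 1 : Nat) : Int) w
        = PySem.List.pySetD dp ((i + 1 : Nat) : Int) w := fun v w => by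
    rw [PySem.List.pySetD_natCast, PySem.List.pySetD_natCast, List.set_set,
      ← PySem.List.pySetD_natCast]
  simp only [pvDpBody, pvRowBody, hc, hget1, hget2, hset,
    apply_ite (PySem.List.pySetD dp ((i + 1 : Nat) : Int))]

lemma pvInnerBridge (m k : Int) (i : Nat) (js : List Int) :
    ∀ (dp : List (List Int)), i + 1 < dp.length →
    js.foldl (pvDpBody m k (i : Int)) dp
      = PySem.List.pySetD dp ((i : Int) + 1)
          (js.foldl (pvRowBody m k (PySem.List.pyGetD dp (i : Int) []))
            (PySem.List.pyGetD dp ((i : Int) + 1) [])) := by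
  have hc : ((i : Int) + 1) = ((i + 1 : Nat) : Int) := by push_cast; ring
  induction js with
  | nil =>
    intro dp h
    simp only [List.foldl_nil, hc, PySem.List.pySetD_natCast]
    rw [PySem.List.pyGetD_natCast, List.getD_eq_getElem _ _ (by omega), List.set_getElem_self]
  | cons j js ih =>
    intro dp h
    rw [List.foldl_cons, List.foldl_cons, pvDpBody_eq m k i dp j h]
    rw [ih _ (by rw [PySem.List.length_pySetD]; exact h)]
    rw [hc]
    have hget1 : ∀ v : List Int,
        PySem.List.pyGetD (PySem.List.pySetD dp ((i + 1 : Nat) : Int) v) ((i + 1 : Nat) : Int) []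
          = v := fun v => by
      rw [PySem.List.pyGetD_pySetD_natCast dp (i + 1) (i + 1) v [] h, if_pos rfl]
    have hget2 : ∀ v : List Int,
        PySem.List.pyGetD (PySem.List.pySetD dp ((i + 1 : Nat) : Int) v) ((i : Nat) : Int) []
          = PySem.List.pyGetD dp ((i : Nat) : Int) [] := fun v => by
      rw [PySem.List.pyGetD_pySetD_natCast dp (i + 1) i v [] h, if_neg (by omega)]
    have hset : ∀ v w : List Int,
        PySem.List.pySetD (PySem.List.pySetD dp ((i + 1 : Nat) : Int) v) ((i + 1 : Nat) : Int) w
          = PySem.List.pySetD dp ((i + 1 : Nat) : Int) w := fun v w => by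
      rw [PySem.List.pySetD_natCast, PySem.List.pySetD_natCast, List.set_set,
        ← PySem.List.pySetD_natCast]
    rw [hget1, hget2, hset]

-- state of the dp table after i outer iterations
def pvD (m : Int) (N K : Nat) (i : Nat) : List (List Int) :=
  (List.range (N + 1)).map (fun r => if r ≤ i then pvRows m K r else List.replicate (K + 1) 0)

lemma pvOuterStep (m : Int) (N K : Nat) (i : Nat) (hi : i < N) :
    (PySem.List.pyRange 0 ((K : Int) + 1) 1).foldl (pvDpBody m (K : Int) (i : Int)) (pvD m N K i)
      = pvD m N K (i + 1) := by
  have hlen : (pvD m N K i).length = N + 1 := by simp [pvD]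
  have hc : ((i : Int) + 1) = ((i + 1 : Nat) : Int) := by push_cast; ring
  rw [pvInnerBridge m (K : Int) i _ (pvD m N K i) (by omega)]
  have hrow1 : PySem.List.pyGetD (pvD m N K i) ((i : Nat) : Int) [] = pvRows m K i := by
    rw [PySem.List.pyGetD_natCast]
    unfold pvD
    rw [PySem.List.getD_map_range _ _ _ _ (by omega), if_pos le_rfl]
  have hrow2 : PySem.List.pyGetD (pvD m N K i) ((i : Int) + 1) [] = List.replicate (K + 1) 0 := by
    rw [hc, PySem.List.pyGetD_natCast]
    unfold pvD
    rw [PySem.List.getD_map_range _ _ _ _ (by omega), if_neg (by omega)]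
  rw [hrow1, hrow2]
  have hfold : (PySem.List.pyRange 0 ((K : Int) + 1) 1).foldl
      (pvRowBody m (K : Int) (pvRows m K i)) (List.replicate (K + 1) 0)
        = pvRows m K (i + 1) := rfl
  rw [hfold, hc, PySem.List.pySetD_natCast]
  apply List.ext_getElem (by simp [pvD])
  intro r h1 h2
  simp only [pvD, List.getElem_set, List.getElem_map, List.getElem_range]
  have hr : r < N + 1 := by simpa [pvD] using h1
  split_ifs <;> (try subst_vars) <;> first | rfl | omega

lemma pvSolve_eq_rows (N K : Nat) (m : Int) :
    solve (N : Int) m (K : Int) = (pvRows m K N).getD K 0 := by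
  have hcN : ((N : Int) + 1) = ((N + 1 : Nat) : Int) := by push_cast; ring
  have hcK : ((K : Int) + 1) = ((K + 1 : Nat) : Int) := by push_cast; ring
  show PySem.List.pyGetD (PySem.List.pyGetD
      (((PySem.List.pyRange 0 ((N : Int)) 1)).foldl
        (fun dp (i : Int) =>
          (PySem.List.pyRange 0 ((K : Int) + 1) 1).foldl (pvDpBody m (K : Int) i) dp)
        (PySem.List.pySetD
          ((PySem.List.pyRange 0 ((N : Int) + 1) 1).map
            (fun _ => PySem.List.pyRepeat [(0 : Int)] ((K : Int) + 1))) 0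
          (PySem.List.pySetD
            (PySem.List.pyGetD ((PySem.List.pyRange 0 ((N : Int) + 1) 1).map
              (fun _ => PySem.List.pyRepeat [(0 : Int)] ((K : Int) + 1))) 0 []) 0 1)))
      ((N : Int)) []) ((K : Int)) 0 = (pvRows m K N).getD K 0
  have hinit : PySem.List.pySetD
      ((PySem.List.pyRange 0 ((N : Int) + 1) 1).map (fun _ => PySem.List.pyRepeat [(0 : Int)] ((K : Int) + 1))) 0
      (PySem.List.pySetD
        (PySem.List.pyGetD ((PySem.List.pyRange 0 ((N : Int) + 1) 1).map
          (fun _ => PySem.List.pyRepeat [(0 : Int)] ((K : Int) + 1))) 0 []) 0 1)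
      = pvD m N K 0 := by
    rw [hcN, PySem.List.pyRange_zero_natCast]
    have hrep : PySem.List.pyRepeat [(0 : Int)] ((K : Int) + 1) = List.replicate (K + 1) 0 := by
      rw [PySem.List.pyRepeat_singleton, hcK, Int.toNat_natCast]
    simp only [List.map_map, Function.comp_def, hrep]
    have h0 : ((0 : Int)) = ((0 : Nat) : Int) := rfl
    rw [h0, PySem.List.pySetD_natCast, PySem.List.pyGetD_natCast,
      PySem.List.pySetD_natCast]
    rw [PySem.List.getD_map_range _ _ _ _ (by omega)]
    apply List.ext_getElem (by simp [pvD])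
    intro r h1 h2
    simp only [pvD, List.getElem_set, List.getElem_map, List.getElem_range]
    split_ifs <;> first | omega | (subst_vars; rfl) | rfl
  rw [hinit, PySem.List.pyRange_zero_natCast, List.foldl_map]
  beta_reduce
  have hout : ∀ i ≤ N, (List.range i).foldl
      (fun dp (i : Nat) => (PySem.List.pyRange 0 ((K : Int) + 1) 1).foldl
        (pvDpBody m (K : Int) ((i : Nat) : Int)) dp) (pvD m N K 0) = pvD m N K i := by
    intro i
    induction i with
    | zero => intro _; rfl
    | succ i ih =>
      intro hi
      rw [List.range_succ, List.foldl_append, ih (by omega), List.foldl_cons, List.foldl_nil]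
      exact pvOuterStep m N K i (by omega)
  rw [hout N le_rfl]
  have hrowN : PySem.List.pyGetD (pvD m N K N) ((N : Nat) : Int) [] = pvRows m K N := by
    rw [PySem.List.pyGetD_natCast]
    unfold pvD
    rw [PySem.List.getD_map_range _ _ _ _ (by omega), if_pos le_rfl]
  rw [hrowN, PySem.List.pyGetD_natCast]

-- ==== main case m ≥ 1: binomial characterisation of the rows ====

-- intended content of entry x of row r: sources t with t*mh = x (x < K) or t*mh ≥ K (x = K)
def pvF (mh K : Nat) (r : Nat) (x : Nat) : Int :=
  ∑ t ∈ Finset.range (r + 1),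
    if (if x < K then t * mh = x else K ≤ t * mh) then ((r.choose t : Nat) : Int) else 0

-- partial accumulation of the inner loop after the first J values of j
def pvQ (g : Nat → Int) (mh K : Nat) (J : Nat) (x : Nat) : Int :=
  (if x < J then g x else 0) +
    (if x < K then ∑ j ∈ Finset.range J, (if j + mh = x then g j else 0)
     else ∑ j ∈ Finset.range J, (if K ≤ j + mh then g j else 0))

lemma pvQ_zero (g : Nat → Int) (mh K x : Nat) : pvQ g mh K 0 x = 0 := by
  simp [pvQ]

lemma pvQ_succ (g : Nat → Int) (mh K J x : Nat) (hm : 1 ≤ mh) (hx : x ≤ K) :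
    pvQ g mh K (J + 1) x
      = pvQ g mh K J x +
          ((if x = J then g J else 0) +
            (if (J + mh ≤ K ∧ x = J + mh) ∨ (K < J + mh ∧ x = K) then g J else 0)) := by
  unfold pvQ
  by_cases hxK : x < K <;>
    simp only [hxK, if_true, if_false, Finset.sum_range_succ] <;>
    split_ifs <;> subst_vars <;> omega

lemma pvQstep (g : Nat → Int) (mh K J : Nat) (hm : 1 ≤ mh) (hJ : J ≤ K) :
    pvRowBody (mh : Int) (K : Int) ((List.range (K + 1)).map g)
        ((List.range (K + 1)).map (fun x => pvQ g mh K J x % pvP)) (J : Int)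
      = (List.range (K + 1)).map (fun x => pvQ g mh K (J + 1) x % pvP) := by
  have hmod : ∀ a b : Int, PySem.Int.mod (a + b) pvP = (a + b) % pvP :=
    fun a b => PySem.Int.mod_eq_emod_of_pos (by norm_num [pvP])
  have hsplit : (((J : Int) + (mh : Int)) < (K : Int) + 1) ↔ (J + mh ≤ K) := by
    push_cast; omega
  have hidx : ((J : Int) + (mh : Int)) = ((J + mh : Nat) : Int) := by push_cast; ring
  unfold pvRowBody
  simp only [hmod]
  rw [PySem.List.pyGetD_natCast _ J (0:Int), PySem.List.getD_map_range _ _ _ _ (by omega)]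
  rw [PySem.List.pyGetD_natCast ((List.range (K+1)).map g) J (0:Int),
    PySem.List.getD_map_range _ _ _ _ (by omega)]
  by_cases hbr : J + mh ≤ K
  · rw [if_pos (hsplit.mpr hbr), hidx]
    rw [PySem.List.pyGetD_pySetD_natCast _ J (J + mh) _ _ (by simp; omega), if_neg (by omega)]
    rw [PySem.List.pyGetD_natCast _ (J + mh) (0:Int), PySem.List.getD_map_range _ _ _ _ (by omega)]
    rw [PySem.List.pySetD_natCast, PySem.List.pySetD_natCast]
    simp only [Int.emod_add_emod]
    apply List.ext_getElem (by simp)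
    intro x hx1 hx2
    have hxK1 : x < K + 1 := by simpa using hx1
    simp only [List.getElem_set, List.getElem_map, List.getElem_range]
    rw [pvQ_succ g mh K J x hm (by omega)]
    split_ifs <;> subst_vars <;> (try congr 1) <;> (try split_ifs) <;> omega
  · rw [if_neg ((not_congr hsplit).mpr hbr)]
    rw [PySem.List.pyGetD_pySetD_natCast _ J K _ _ (by simp; omega)]
    rw [PySem.List.pyGetD_natCast _ K (0:Int), PySem.List.getD_map_range _ _ _ _ (by omega)]
    rw [PySem.List.pySetD_natCast, PySem.List.pySetD_natCast]
    by_cases hJK : K = J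
    · rw [if_pos hJK]
      simp only [Int.emod_add_emod]
      apply List.ext_getElem (by simp)
      intro x hx1 hx2
      have hxK1 : x < K + 1 := by simpa using hx1
      simp only [List.getElem_set, List.getElem_map, List.getElem_range]
      rw [pvQ_succ g mh K J x hm (by omega)]
      split_ifs <;> subst_vars <;> (try congr 1) <;> (try split_ifs) <;> omega
    · rw [if_neg hJK]
      simp only [Int.emod_add_emod]
      apply List.ext_getElem (by simp)
      intro x hx1 hx2
      have hxK1 : x < K + 1 := by simpa using hx1
      simp only [List.getElem_set, List.getElem_map, List.getElem_range]
      rw [pvQ_succ g mh K J x hm (by omega)]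
      split_ifs <;> subst_vars <;> (try congr 1) <;> (try split_ifs) <;> omega

lemma pvRowStep_main (g : Nat → Int) (mh K : Nat) (hm : 1 ≤ mh) :
    pvRowStep (mh : Int) K ((List.range (K + 1)).map g)
      = (List.range (K + 1)).map (fun x => pvQ g mh K (K + 1) x % pvP) := by
  unfold pvRowStep
  have hcK : ((K : Int) + 1) = ((K + 1 : Nat) : Int) := by push_cast; ring
  rw [hcK, PySem.List.pyRange_zero_natCast, List.foldl_map]
  have inv : ∀ J, J ≤ K + 1 → (List.range J).foldl
      (fun cur (j : Nat) => pvRowBody (mh : Int) (K : Int) ((List.range (K + 1)).map g) cur (j : Int))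
      (List.replicate (K + 1) 0)
        = (List.range (K + 1)).map (fun x => pvQ g mh K J x % pvP) := by
    intro J
    induction J with
    | zero =>
      intro _
      rw [show (fun x => pvQ g mh K 0 x % pvP) = (fun _ : Nat => (0 : Int)) from
        funext (fun x => by rw [pvQ_zero, Int.zero_emod])]
      rw [List.map_const', List.length_range, List.range_zero, List.foldl_nil]
    | succ J ih =>
      intro hJ
      rw [show List.range (J + 1) = List.range J ++ [J] from List.range_succ,
        List.foldl_append, ih (by omega), List.foldl_cons, List.foldl_nil]
      exact pvQstep g mh K J hm (by omega)
  exact inv (K + 1) le_rfl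


-- pure arithmetic: one Pascal step on the closed form
lemma pvF_step (mh K : Nat) (r : Nat) (x : Nat) (hm : 1 ≤ mh) (hx : x ≤ K) :
    pvQ (pvF mh K r) mh K (K + 1) x = pvF mh K (r + 1) x := by
  have hsplit : pvF mh K (r + 1) x
      = pvF mh K r x + ∑ t ∈ Finset.range (r + 1),
          (if (if x < K then (t + 1) * mh = x else K ≤ (t + 1) * mh)
            then ((r.choose t : Nat) : Int) else 0) := by
    have e1 : pvF mh K (r + 1) x
        = (∑ t ∈ Finset.range (r + 1),
            (if (if x < K then (t + 1) * mh = x else K ≤ (t + 1) * mh)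
              then (((r + 1).choose (t + 1) : Nat) : Int) else 0))
          + (if (if x < K then 0 * mh = x else K ≤ 0 * mh)
              then (((r + 1).choose 0 : Nat) : Int) else 0) :=
      Finset.sum_range_succ' _ (r + 1)
    have e3 : (∑ t ∈ Finset.range (r + 2),
        (if (if x < K then t * mh = x else K ≤ t * mh)
          then ((r.choose t : Nat) : Int) else 0))
        = pvF mh K r x := by
      rw [Finset.sum_range_succ]
      have hc0 : ((r.choose (r + 1) : Nat) : Int) = 0 := by simp [Nat.choose_succ_self]
      rw [hc0, ite_self, add_zero]
      rfl
    have e2 : pvF mh K r x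
        = (∑ t ∈ Finset.range (r + 1),
            (if (if x < K then (t + 1) * mh = x else K ≤ (t + 1) * mh)
              then ((r.choose (t + 1) : Nat) : Int) else 0))
          + (if (if x < K then 0 * mh = x else K ≤ 0 * mh)
              then ((r.choose 0 : Nat) : Int) else 0) := by
      rw [← e3]
      exact Finset.sum_range_succ' _ (r + 1)
    have hterm : ∀ t ∈ Finset.range (r + 1),
        (if (if x < K then (t + 1) * mh = x else K ≤ (t + 1) * mh)
          then (((r + 1).choose (t + 1) : Nat) : Int) else 0)
          = (if (if x < K then (t + 1) * mh = x else K ≤ (t + 1) * mh)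
              then ((r.choose (t + 1) : Nat) : Int) else 0)
            + (if (if x < K then (t + 1) * mh = x else K ≤ (t + 1) * mh)
              then ((r.choose t : Nat) : Int) else 0) := by
      intro t _
      rw [Nat.choose_succ_succ]
      push_cast
      split_ifs <;> ring
    have hzero : (((r + 1).choose 0 : Nat) : Int) = ((r.choose 0 : Nat) : Int) := by simp
    rw [e1, Finset.sum_congr rfl hterm, Finset.sum_add_distrib, hzero, e2]
    ring
  rw [hsplit]
  unfold pvQ
  rw [if_pos (show x < K + 1 by omega)]
  congr 1
  by_cases hxK : x < K
  · simp only [hxK, if_true]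
    by_cases hmx : mh ≤ x
    · have h1 : ∀ j ∈ Finset.range (K + 1),
          (if j + mh = x then pvF mh K r j else 0)
            = (if j = x - mh then pvF mh K r j else 0) :=
        fun j _ => if_congr (by omega) rfl rfl
      rw [Finset.sum_congr rfl h1,
        Finset.sum_ite_eq' (Finset.range (K + 1)) (x - mh) (fun j => pvF mh K r j),
        if_pos (Finset.mem_range.mpr (by omega))]
      unfold pvF
      refine Finset.sum_congr rfl (fun t _ => if_congr ?_ rfl rfl)
      rw [if_pos (show x - mh < K by omega)]
      have hmul : (t + 1) * mh = t * mh + mh := by ring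
      rw [hmul]
      omega
    · rw [Finset.sum_eq_zero (fun j _ => if_neg (by omega)),
        Finset.sum_eq_zero (fun t _ => if_neg (by
          have hmul : (t + 1) * mh = t * mh + mh := by ring
          rw [hmul]
          omega))]
  · have hxKe : x = K := by omega
    subst hxKe
    simp only [hxK, if_false]
    have hswap : ∀ j ∈ Finset.range (x + 1),
        (if x ≤ j + mh then pvF mh x r j else 0)
          = ∑ t ∈ Finset.range (r + 1),
              (if x ≤ j + mh then
                (if (if j < x then t * mh = j else x ≤ t * mh)
                  then ((r.choose t : Nat) : Int) else 0) else 0) := by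
      intro j _
      unfold pvF
      split <;> simp
    rw [Finset.sum_congr rfl hswap, Finset.sum_comm]
    refine Finset.sum_congr rfl (fun t _ => ?_)
    rw [Finset.sum_range_succ]
    have hlast : (if x ≤ x + mh then
        (if (if x < x then t * mh = x else x ≤ t * mh)
          then ((r.choose t : Nat) : Int) else 0) else 0)
        = (if x ≤ t * mh then ((r.choose t : Nat) : Int) else 0) := by
      rw [if_pos (by omega)]
      exact if_congr (by rw [if_neg (lt_irrefl x)]) rfl rfl
    rw [hlast]
    have hrest : ∀ j ∈ Finset.range x,
        (if x ≤ j + mh then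
          (if (if j < x then t * mh = j else x ≤ t * mh)
            then ((r.choose t : Nat) : Int) else 0) else 0)
          = (if j = t * mh then (if x ≤ j + mh then ((r.choose t : Nat) : Int) else 0) else 0) := by
      intro j hj
      have hjx : j < x := Finset.mem_range.mp hj
      have hc : (if (if j < x then t * mh = j else x ≤ t * mh)
          then ((r.choose t : Nat) : Int) else 0)
          = (if t * mh = j then ((r.choose t : Nat) : Int) else 0) :=
        if_congr (iff_of_eq (if_pos hjx)) rfl rfl
      rw [hc]
      split_ifs <;> omega
    rw [Finset.sum_congr rfl hrest,
      Finset.sum_ite_eq' (Finset.range x) (t * mh)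
        (fun j => if x ≤ j + mh then ((r.choose t : Nat) : Int) else 0)]
    have hmul : (t + 1) * mh = t * mh + mh := by ring
    simp only [hmul, Finset.mem_range]
    split_ifs <;> omega

lemma pvQ_mod (g : Nat → Int) (mh K J x : Nat) :
    pvQ (fun y => g y % pvP) mh K J x % pvP = pvQ g mh K J x % pvP := by
  have h1 : ∀ (c : Prop) [Decidable c] (a : Int),
      (if c then a % pvP else 0) % pvP = (if c then a else 0) % pvP := by
    intro c _ a
    split
    · exact Int.emod_emod_of_dvd _ dvd_rfl
    · rfl
  have h2 : ∀ (c : Nat → Prop) [DecidablePred c],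
      (∑ j ∈ Finset.range J, if c j then g j % pvP else 0) % pvP
        = (∑ j ∈ Finset.range J, if c j then g j else 0) % pvP := by
    intro c _
    rw [Finset.sum_int_mod]
    conv_rhs => rw [Finset.sum_int_mod]
    congr 1
    exact Finset.sum_congr rfl (fun j _ => h1 _ _)
  unfold pvQ
  by_cases hxK : x < K <;>
    simp only [hxK, if_true, if_false] <;>
    rw [Int.add_emod, h1, h2, ← Int.add_emod]

lemma pvRows_main (mh K : Nat) (hm : 1 ≤ mh) (r : Nat) :
    pvRows (mh : Int) K r = (List.range (K + 1)).map (fun x => pvF mh K r x % pvP) := by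
  induction r with
  | zero =>
    apply List.ext_getElem (by simp [pvRows])
    intro x h1 h2
    have hx : x < K + 1 := by simpa [pvRows] using h1
    show ((List.replicate (K + 1) (0 : Int)).set 0 1)[x] = _
    simp only [List.getElem_set, List.getElem_map, List.getElem_range, List.getElem_replicate]
    unfold pvF
    rw [Finset.sum_range_one]
    simp only [zero_mul]
    split_ifs <;> first | omega | norm_num [pvP]
  | succ r ih =>
    show pvRowStep (mh : Int) K (pvRows (mh : Int) K r) = _
    rw [ih, pvRowStep_main (fun x => pvF mh K r x % pvP) mh K hm]
    apply List.map_congr_left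
    intro x hx
    have hxK : x ≤ K := by have := List.mem_range.mp hx; omega
    rw [pvQ_mod, pvF_step mh K r x hm hxK]


-- ==== case m = 0: every row doubles ====
lemma pvMzeroStep (prev : List Int) (K : Nat) (hlen : prev.length = K + 1) :
    pvRowStep 0 K prev = (List.range (K + 1)).map (fun x => (2 * prev.getD x 0) % pvP) := by
  unfold pvRowStep
  have hcK : ((K : Int) + 1) = ((K + 1 : Nat) : Int) := by push_cast; ring
  rw [hcK, PySem.List.pyRange_zero_natCast, List.foldl_map]
  have hmod : ∀ a b : Int, PySem.Int.mod (a + b) pvP = (a + b) % pvP :=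
    fun a b => PySem.Int.mod_eq_emod_of_pos (by norm_num [pvP])
  have inv : ∀ J, J ≤ K + 1 → (List.range J).foldl
      (fun cur (j : Nat) => pvRowBody 0 (K : Int) prev cur (j : Int))
      (List.replicate (K + 1) 0)
        = (List.range (K + 1)).map (fun x => if x < J then (2 * prev.getD x 0) % pvP else 0) := by
    intro J
    induction J with
    | zero =>
      intro _
      rw [show (fun x : Nat => if x < 0 then (2 * prev.getD x 0) % pvP else (0:Int))
          = (fun _ : Nat => (0 : Int)) from funext (fun x => by rw [if_neg (by omega)])]
      rw [List.map_const', List.length_range, List.range_zero, List.foldl_nil]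
    | succ J ih =>
      intro hJ
      rw [show List.range (J + 1) = List.range J ++ [J] from List.range_succ,
        List.foldl_append, ih (by omega), List.foldl_cons, List.foldl_nil]
      unfold pvRowBody
      simp only [hmod]
      rw [PySem.List.pyGetD_natCast _ J (0:Int), PySem.List.getD_map_range _ _ _ _ (by omega)]
      rw [if_neg (by omega : ¬ J < J)]
      rw [PySem.List.pyGetD_natCast prev J (0:Int)]
      rw [if_pos (show (J : Int) + 0 < (K : Int) + 1 by push_cast; omega)]
      rw [add_zero]
      rw [PySem.List.pyGetD_pySetD_natCast _ J J _ _ (by simp; omega), if_pos rfl]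
      rw [PySem.List.pySetD_natCast, PySem.List.pySetD_natCast, List.set_set]
      apply List.ext_getElem (by simp)
      intro x hx1 hx2
      have hxK1 : x < K + 1 := by simpa using hx1
      simp only [List.getElem_set, List.getElem_map, List.getElem_range]
      rw [zero_add, Int.emod_add_emod]
      split_ifs <;> subst_vars <;> first | omega | rfl | (congr 1; ring)
  rw [inv (K + 1) le_rfl]
  apply List.map_congr_left
  intro x hx
  rw [if_pos (List.mem_range.mp hx)]

lemma pvRows_mzero (K : Nat) (r : Nat) :
    pvRows 0 K r
      = (List.range (K + 1)).map (fun x => (2 ^ r * (if x = 0 then 1 else 0) : Int) % pvP) := by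
  induction r with
  | zero =>
    apply List.ext_getElem (by simp [pvRows])
    intro x h1 h2
    have hx : x < K + 1 := by simpa [pvRows] using h1
    show ((List.replicate (K + 1) (0 : Int)).set 0 1)[x] = _
    simp only [List.getElem_set, List.getElem_map, List.getElem_range, List.getElem_replicate]
    split_ifs <;> first | omega | norm_num [pvP]
  | succ r ih =>
    show pvRowStep 0 K (pvRows 0 K r) = _
    rw [ih, pvMzeroStep _ K (by simp)]
    apply List.map_congr_left
    intro x hx
    have hxK1 : x < K + 1 := List.mem_range.mp hx
    rw [List.getD_eq_getElem _ _ (by simp [hxK1]), List.getElem_map, List.getElem_range]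
    rw [Int.mul_emod 2 _, Int.emod_emod_of_dvd _ dvd_rfl, ← Int.mul_emod]
    congr 1
    ring


-- ==== case m = -1, k = 0: the single cell doubles (negative index wraps to 0) ====
lemma pvRows_mneg (r : Nat) : pvRows (-1) 0 r = [(2 ^ r : Int) % pvP] := by
  induction r with
  | zero =>
    show (List.replicate 1 (0 : Int)).set 0 1 = _
    norm_num [pvP]
  | succ r ih =>
    show pvRowStep (-1) 0 (pvRows (-1) 0 r) = _
    rw [ih]
    have e : pvRowStep (-1) 0 [(2 ^ r : Int) % pvP]
        = [PySem.Int.mod (PySem.Int.mod (0 + ((2 ^ r : Int) % pvP)) pvP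
            + ((2 ^ r : Int) % pvP)) pvP] := rfl
    rw [e]
    have hmod : ∀ a b : Int, PySem.Int.mod (a + b) pvP = (a + b) % pvP :=
      fun a b => PySem.Int.mod_eq_emod_of_pos (by norm_num [pvP])
    rw [hmod, hmod, zero_add, Int.emod_emod_of_dvd _ dvd_rfl, ← Int.add_emod]
    congr 1
    ring


-- ==== B side ====
def pvTmin (m k : Int) : Int :=
  if -(PySem.Int.floordiv (-k) m) < 0 then 0 else -(PySem.Int.floordiv (-k) m)

lemma pvBfold (N : Nat) (tmin : Int) : ∀ i, i ≤ N + 1 →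
    ((List.range i).map (fun t : Nat => (t : Int))).foldl
        (fun tc t => ((if tmin ≤ t then tc.1 + tc.2 else tc.1),
          PySem.Int.floordiv (tc.2 * ((N : Int) - t)) (t + 1))) ((0 : Int), (1 : Int))
      = (∑ t ∈ Finset.range i, if tmin ≤ (t : Int) then ((N.choose t : Nat) : Int) else 0,
          ((N.choose i : Nat) : Int)) := by
  intro i
  induction i with
  | zero => intro _; simp
  | succ i ih =>
    intro hi
    rw [List.range_succ, List.map_append, List.foldl_append, ih (by omega)]
    have hc : PySem.Int.floordiv (((N.choose i : Nat) : Int) * ((N : Int) - (i : Int))) ((i : Int) + 1)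
        = ((N.choose (i + 1) : Nat) : Int) := by
      have hiN : i ≤ N := by omega
      have hsub : ((N : Int) - (i : Int)) = ((N - i : Nat) : Int) := by
        push_cast [hiN]
        ring
      rw [hsub, show ((i : Int) + 1) = ((i + 1 : Nat) : Int) by push_cast; ring]
      rw [show ((N.choose i : Nat) : Int) * ((N - i : Nat) : Int)
          = (((N.choose i * (N - i)) : Nat) : Int) by push_cast; ring]
      rw [PySem.Int.floordiv_natCast]
      congr 1
      rw [← Nat.choose_succ_right_eq]
      exact Nat.mul_div_cancel _ (Nat.succ_pos i)
    simp only [List.map_cons, List.map_nil, List.foldl_cons, List.foldl_nil]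
    rw [hc, Finset.sum_range_succ]
    split_ifs <;> simp


lemma pvB_eq (N : Nat) (m k : Int) (hm : 0 < m) :
    solve_alt (N : Int) m k
      = (∑ t ∈ Finset.range (N + 1),
          if pvTmin m k ≤ (t : Int) then ((N.choose t : Nat) : Int) else 0) % pvP := by
  simp only [solve_alt]
  rw [if_neg (not_le.mpr hm)]
  have hcN : ((N : Int) + 1) = ((N + 1 : Nat) : Int) := by push_cast; ring
  rw [hcN, PySem.List.pyRange_zero_natCast]
  rw [pvBfold N (if -(PySem.Int.floordiv (-k) m) < 0 then 0 else -(PySem.Int.floordiv (-k) m))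
    (N + 1) le_rfl]
  rw [PySem.Int.mod_eq_emod_of_pos (by norm_num : (0:Int) < 998244353)]
  rfl

lemma pvAlt_nonpos_k0 (N : Nat) (m : Int) (hm : m ≤ 0) :
    solve_alt (N : Int) m 0 = (2 ^ N : Int) % pvP := by
  simp only [solve_alt]
  rw [if_pos hm, if_pos le_rfl]
  show PySem.Int.powMod 2 ((N : Int)).toNat 998244353 = _
  simp [PySem.Int.powMod, PySem.Int.mod_eq_emod_of_pos (by norm_num : (0:Int) < 998244353), pvP]

lemma pvAlt_nonpos_pos (N : Nat) (m k : Int) (hm : m ≤ 0) (hk : ¬ k ≤ 0) :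
    solve_alt (N : Int) m k = 0 := by
  simp only [solve_alt]
  rw [if_pos hm, if_neg hk]

lemma pvTmin_le_iff (mh K : Nat) (hm : 1 ≤ mh) (t : Nat) :
    (K ≤ t * mh) ↔ (pvTmin (mh : Int) (K : Int) ≤ (t : Int)) := by
  have hmpos : (0:Int) < (mh:Int) := by exact_mod_cast hm
  have hbr := (PySem.Int.neg_floordiv_neg_eq_iff_of_pos (a := (K:Int)) (b := (mh:Int))
    (q := -(PySem.Int.floordiv (-(K:Int)) (mh:Int))) hmpos).mp rfl
  have hq0 : 0 ≤ -(PySem.Int.floordiv (-(K:Int)) (mh:Int)) := by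
    by_contra h
    have h1 : -(PySem.Int.floordiv (-(K:Int)) (mh:Int)) ≤ -1 := by omega
    have h2 : -(PySem.Int.floordiv (-(K:Int)) (mh:Int)) * (mh:Int) ≤ (-1) * (mh:Int) :=
      mul_le_mul_of_nonneg_right h1 hmpos.le
    have h3 : (0:Int) ≤ (K:Int) := by positivity
    omega
  have htm : pvTmin (mh:Int) (K:Int) = -(PySem.Int.floordiv (-(K:Int)) (mh:Int)) := by
    unfold pvTmin
    rw [if_neg (by omega)]
  rw [htm]
  constructor
  · intro h
    by_contra hlt
    have h1 : (t:Int) ≤ -(PySem.Int.floordiv (-(K:Int)) (mh:Int)) - 1 := by omega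
    have h2 : (t:Int) * (mh:Int) ≤ (-(PySem.Int.floordiv (-(K:Int)) (mh:Int)) - 1) * (mh:Int) :=
      mul_le_mul_of_nonneg_right h1 hmpos.le
    have h3 : (K:Int) ≤ (t:Int) * (mh:Int) := by exact_mod_cast h
    omega
  · intro h
    have h2 : -(PySem.Int.floordiv (-(K:Int)) (mh:Int)) * (mh:Int) ≤ (t:Int) * (mh:Int) :=
      mul_le_mul_of_nonneg_right h hmpos.le
    have h3 : (K:Int) ≤ (t:Int) * (mh:Int) := le_trans hbr.2 h2
    exact_mod_cast h3


-- ===== VERDICT (by name: the statement is the Claim_ definition above) =====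
theorem solve_spec : Claim_unchanged_solve := by
  unfold Claim_unchanged_solve
  intro n m k hdom hpre
  unfold Spec_solve
  intro hnd
  obtain ⟨hn, hk, hpre3⟩ := hpre
  obtain ⟨N, rfl⟩ := Int.eq_ofNat_of_zero_le hn
  obtain ⟨K, rfl⟩ := Int.eq_ofNat_of_zero_le hk
  rcases lt_trichotomy m 0 with hm | rfl | hm
  · -- m < 0 : outside D_ forces K = 0 or N = 0
    have hKN : K = 0 ∨ N = 0 := by
      by_contra h
      push_neg at h
      exact hnd ⟨hm, by exact_mod_cast Nat.one_le_iff_ne_zero.mpr h.1,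
        by exact_mod_cast Nat.one_le_iff_ne_zero.mpr h.2⟩
    rcases hKN with hK0 | hN0
    · subst hK0
      rcases hpre3 with hge | hN0'
      · have hm1 : m = -1 := by omega
        subst hm1
        have hA : solve (N : Int) (-1) ((0 : Nat) : Int) = (2 ^ N : Int) % pvP := by
          rw [pvSolve_eq_rows N 0 (-1), pvRows_mneg]
          rfl
        exact hA.trans (pvAlt_nonpos_k0 N (-1) (by norm_num)).symm
      · have hN : N = 0 := by exact_mod_cast hN0'
        subst hN
        have hA : solve ((0 : Nat) : Int) m ((0 : Nat) : Int) = 1 := by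
          rw [pvSolve_eq_rows 0 0 m]
          norm_num [pvRows]
        have hB : solve_alt ((0 : Nat) : Int) m 0 = 1 := by
          rw [pvAlt_nonpos_k0 0 m hm.le]
          norm_num [pvP]
        exact hA.trans hB.symm
    · have hN : N = 0 := by exact_mod_cast hN0
      subst hN
      by_cases hK : K = 0
      · subst hK
        have hA : solve ((0 : Nat) : Int) m ((0 : Nat) : Int) = 1 := by
          rw [pvSolve_eq_rows 0 0 m]
          norm_num [pvRows]
        have hB : solve_alt ((0 : Nat) : Int) m 0 = 1 := by
          rw [pvAlt_nonpos_k0 0 m hm.le]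
          norm_num [pvP]
        exact hA.trans hB.symm
      · have hA : solve ((0 : Nat) : Int) m ((K : Nat) : Int) = 0 := by
          rw [pvSolve_eq_rows 0 K m]
          show ((List.replicate (K + 1) (0 : Int)).set 0 1).getD K 0 = 0
          rw [List.getD_eq_getElem _ _ (by simp)]
          simp only [List.getElem_set, List.getElem_replicate]
          rw [if_neg (by omega)]
        exact hA.trans (pvAlt_nonpos_pos 0 m K hm.le
          (not_le.mpr (by exact_mod_cast Nat.pos_of_ne_zero hK))).symm
  · -- m = 0
    have hA : solve (N : Int) 0 (K : Int) = (2 ^ N * (if K = 0 then 1 else 0) : Int) % pvP := by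
      rw [pvSolve_eq_rows N K 0, pvRows_mzero]
      rw [List.getD_eq_getElem _ _ (by simp)]
      rw [List.getElem_map, List.getElem_range]
    rw [hA]
    by_cases hK : K = 0
    · subst hK
      rw [if_pos rfl, mul_one]
      exact (pvAlt_nonpos_k0 N 0 le_rfl).symm
    · have hKpos : ¬ ((K : Int) ≤ 0) :=
        not_le.mpr (by exact_mod_cast Nat.pos_of_ne_zero hK)
      rw [if_neg hK, mul_zero, Int.zero_emod]
      exact (pvAlt_nonpos_pos N 0 K le_rfl hKpos).symm
  · -- m > 0
    obtain ⟨mh, rfl⟩ : ∃ mh : Nat, m = (mh : Int) :=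
      ⟨m.toNat, (Int.toNat_of_nonneg (le_of_lt hm)).symm⟩
    have hm1 : 1 ≤ mh := by exact_mod_cast hm
    rw [pvSolve_eq_rows N K (mh : Int), pvRows_main mh K hm1 N]
    rw [List.getD_eq_getElem _ _ (by simp)]
    rw [List.getElem_map, List.getElem_range]
    rw [pvB_eq N (mh : Int) (K : Int) hm]
    congr 1
    unfold pvF
    refine Finset.sum_congr rfl (fun t _ => ?_)
    simp only [lt_self_iff_false, if_false]
    exact if_congr (pvTmin_le_iff mh K hm1 t) rfl rfl
theorem solve_changed : Claim_changed_solve := by unfold Claim_changed_solve; decide
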